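-- pv_equiv track=rewrite | github.com/xmojtabw/AI-Tetris | piece.py | _stick_to_corner
-- ===== SOURCE A (Python) =====
-- def _stick_to_corner(shape: list) -> list:
--     top_aligned_shape = [len(shape[0]) * ["."] for _ in range(len(shape))]
--
--     # stick to buttom
--     free_line_count = 0
--     for i in range(len(shape)):
--         if "X" not in shape[i]:
--             free_line_count += 1
--         else:
--             break
--
--     for i in range(len(shape) - free_line_count):
--         top_aligned_shape[i] = shape[i + free_line_count]
--
--     # stick to left
--     aligned_shape = [len(shape[0]) * ["."] for _ in range(len(shape))]
--     free_line_count = 0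
--     for i in range(len(top_aligned_shape[0])):
--         if "X" not in [
--             top_aligned_shape[j][i] for j in range(len(top_aligned_shape))
--         ]:
--             free_line_count += 1
--         else:
--             break
--
--     for i in range(len(top_aligned_shape[0]) - free_line_count):
--         for j in range(len(top_aligned_shape)):
--             aligned_shape[j][i] = top_aligned_shape[j][i + free_line_count]
--
--     return aligned_shape
-- ===== SOURCE B (Python) =====
-- def _stick_to_corner(shape: list) -> list:
--     rows, cols = len(shape), len(shape[0])
--     xs = [(r, c) for r in range(rows) for c in range(len(shape[r])) if shape[r][c] == "X"]
--     min_r = min((r for r, _ in xs), default=rows)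
--     min_c = min((c for _, c in xs), default=cols)
--     return [[shape[r + min_r][c + min_c] if r + min_r < rows and c + min_c < cols else "."
--              for c in range(cols)] for r in range(rows)]
-- ===== Notes on version B (the rewrite author's own statement) =====
-- stated objective: simpler
-- what changed: B computes the minimal X row and column offsets once and builds the result grid in a single fused pass over (row, col), dropping A's intermediate top_aligned grid and its two sequential shift passes.
-- outside the precondition, e.g. on _stick_to_corner([['.', '.'], ['X']]): A returns [['X', '.'], ['.', '.']], B raises IndexError
import Mathlib
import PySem

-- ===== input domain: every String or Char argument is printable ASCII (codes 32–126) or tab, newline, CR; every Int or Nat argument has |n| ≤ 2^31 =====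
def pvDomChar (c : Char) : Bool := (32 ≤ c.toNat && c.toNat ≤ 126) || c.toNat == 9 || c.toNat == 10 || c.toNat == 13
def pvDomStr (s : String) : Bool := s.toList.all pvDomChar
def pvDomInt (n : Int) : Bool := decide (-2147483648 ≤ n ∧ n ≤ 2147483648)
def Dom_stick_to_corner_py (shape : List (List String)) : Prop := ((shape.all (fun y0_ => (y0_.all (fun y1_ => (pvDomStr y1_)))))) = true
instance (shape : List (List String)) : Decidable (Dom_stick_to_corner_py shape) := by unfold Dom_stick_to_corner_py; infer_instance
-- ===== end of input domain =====

-- B builds the result in one fused pass from the two minimal X offsets instead of A's two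
-- sequential shift passes through an intermediate grid (objective: simpler; same asymptotic cost).

-- ===== PORT A =====
-- A's first loop: count leading rows without "X", breaking at the first row that has one
def pvRowFree : List (List String) → Nat
  | [] => 0
  | r :: rs => if "X" ∈ r then 0 else pvRowFree rs + 1

-- the Python column list [top_aligned[j][i] for j in range(len(top_aligned))]
def pvCol (g : List (List String)) (i : Nat) : List String :=
  g.map (fun row => row.getD i "?")

-- A's third loop: count leading "X"-free columns i < w of g, breaking at the first X column
def pvColFree (g : List (List String)) (w i : Nat) : Nat :=
  if _h : i < w then
    if "X" ∈ pvCol g i then 0 else pvColFree g w (i + 1) + 1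
  else 0
termination_by w - i

-- A's intermediate grid top_aligned_shape after the second loop
def pvTop (shape : List (List String)) : List (List String) :=
  (List.range shape.length).map (fun i =>
    if i < shape.length - pvRowFree shape then shape.getD (i + pvRowFree shape) []
    else List.replicate (shape.headD []).length ".")

def stick_to_corner_py (shape : List (List String)) : List (List String) :=
  let top := pvTop shape
  let flcC := pvColFree top (top.headD []).length 0
  (List.range shape.length).map (fun j =>
    (List.range (shape.headD []).length).map (fun i =>
      if i < (top.headD []).length - flcC then (top.getD j []).getD (i + flcC) "." else "."))

-- ===== PORT B =====
-- B's comprehension: all (row, col) positions holding an "X"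
def pvXs (shape : List (List String)) : List (Nat × Nat) :=
  (List.range shape.length).flatMap (fun r =>
    (List.range ((shape.getD r []).length)).filterMap (fun c =>
      if (shape.getD r []).getD c "?" = "X" then some (r, c) else none))

def stick_to_corner_py_alt (shape : List (List String)) : List (List String) :=
  let rows := shape.length
  let cols := (shape.headD []).length
  let xs := pvXs shape
  let minr := ((xs.map Prod.fst).min?).getD rows
  let minc := ((xs.map Prod.snd).min?).getD cols
  (List.range rows).map (fun r =>
    (List.range cols).map (fun c =>
      if r + minr < rows ∧ c + minc < cols then
        (shape.getD (r + minr) []).getD (c + minc) "." else "."))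

-- ===== PRECONDITION & SPEC =====
-- Pre_ excludes the empty grid (A raises IndexError on shape[0]) and grids with an "X" whose
-- first X-row is not exactly len(shape[0]) wide or where some row at or after it is narrower:
-- there A mixes len(shape[0]) with the length of the row-shifted grid's first row, so it raises
-- IndexError or silently truncates/pads as an artefact of that raggedness.
def Pre_stick_to_corner_py (shape : List (List String)) : Prop :=
  shape ≠ [] ∧
    ((∀ row ∈ shape, "X" ∉ row) ∨
      ((∀ i ∈ List.range shape.length,
          ("X" ∈ shape.getD i [] ∧ ∀ j ∈ List.range i, "X" ∉ shape.getD j []) →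
            (shape.getD i []).length = (shape.headD []).length) ∧
       (∀ i ∈ List.range shape.length,
          (∃ j ∈ List.range (i + 1), "X" ∈ shape.getD j []) →
            (shape.headD []).length ≤ (shape.getD i []).length)))
instance (shape : List (List String)) : Decidable (Pre_stick_to_corner_py shape) := by
  unfold Pre_stick_to_corner_py; infer_instance

def pvWitness_stick_to_corner_py : List (List String) := [[".", "X"], [".", "."]]

def Spec_stick_to_corner_py (shape : List (List String)) (out : List (List String)) : Prop := out = stick_to_corner_py_alt shape
instance (shape : List (List String)) (out : List (List String)) : Decidable (Spec_stick_to_corner_py shape out) := by unfold Spec_stick_to_corner_py; infer_instance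

-- ===== CLAIM (what is proved, stated in full; the proofs are below) =====
def Claim_equal_stick_to_corner_py : Prop := ∀ (shape : List (List String)), Dom_stick_to_corner_py shape → Pre_stick_to_corner_py shape → Spec_stick_to_corner_py shape (stick_to_corner_py shape)

-- ===== LEMMAS AND PROOFS =====

theorem getD_mem_iff {row : List String} :
    "X" ∈ row ↔ ∃ c, c < row.length ∧ row.getD c "?" = "X" := by
  constructor
  · intro h
    obtain ⟨i, hi, hv⟩ := List.mem_iff_getElem.mp h
    exact ⟨i, hi, by rw [List.getD_eq_getElem _ _ hi]; exact hv⟩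
  · rintro ⟨c, hc, hv⟩
    rw [List.getD_eq_getElem _ _ hc] at hv
    exact hv ▸ List.getElem_mem hc

theorem mem_pvXs {shape : List (List String)} {r c : Nat} :
    (r, c) ∈ pvXs shape ↔
      r < shape.length ∧ c < (shape.getD r []).length ∧ (shape.getD r []).getD c "?" = "X" := by
  simp only [pvXs, List.mem_flatMap, List.mem_filterMap, List.mem_range,
    Option.ite_none_right_eq_some, Option.some.injEq, Prod.mk.injEq]
  constructor
  · rintro ⟨a, ha, b, hb, hv, rfl, rfl⟩
    exact ⟨ha, hb, hv⟩
  · rintro ⟨hr, hc, hv⟩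
    exact ⟨r, hr, c, hc, hv, rfl, rfl⟩

theorem getD_mem_shape {shape : List (List String)} {r : Nat} (h : r < shape.length) :
    shape.getD r [] ∈ shape := by
  rw [List.getD_eq_getElem _ _ h]; exact List.getElem_mem h

theorem rowFree_all {s : List (List String)} (h : ∀ r ∈ s, "X" ∉ r) :
    pvRowFree s = s.length := by
  induction s with
  | nil => rfl
  | cons r rs ih =>
      simp only [pvRowFree, List.length_cons]
      rw [if_neg (h r (by simp)), ih (fun x hx => h x (by simp [hx]))]

theorem rowFree_le_of_mem {s : List (List String)} {k : Nat}
    (h : "X" ∈ s.getD k []) : pvRowFree s ≤ k := by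
  induction s generalizing k with
  | nil => simp at h
  | cons r rs ih =>
      cases k with
      | zero =>
          simp only [List.getD_cons_zero] at h
          simp [pvRowFree, h]
      | succ k =>
          simp only [List.getD_cons_succ] at h
          simp only [pvRowFree]
          split
          · omega
          · exact Nat.succ_le_succ (ih h)

theorem rowFree_mem {s : List (List String)} (h : pvRowFree s < s.length) :
    "X" ∈ s.getD (pvRowFree s) [] := by
  induction s with
  | nil => simp [pvRowFree] at h
  | cons r rs ih =>
      by_cases hr : "X" ∈ r
      · simpa [pvRowFree, hr]
      · simp only [pvRowFree, if_neg hr, List.length_cons] at h ⊢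
        rw [List.getD_cons_succ]
        exact ih (by omega)

theorem rowFree_not_mem {s : List (List String)} {k : Nat} (h : k < pvRowFree s) :
    "X" ∉ s.getD k [] := by
  induction s generalizing k with
  | nil => simp [pvRowFree] at h
  | cons r rs ih =>
      simp only [pvRowFree] at h
      split at h
      · omega
      · cases k with
        | zero => simpa
        | succ k =>
            rw [List.getD_cons_succ]
            exact ih (by omega)

theorem colFree_all {g : List (List String)} {w : Nat} :
    ∀ i, (∀ j, i ≤ j → j < w → "X" ∉ pvCol g j) → pvColFree g w i = w - i := by
  intro i
  induction hd : w - i generalizing i with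
  | zero =>
      intro _
      rw [pvColFree, dif_neg (by omega)]
  | succ d ih =>
      intro h
      rw [pvColFree, dif_pos (by omega : i < w),
        if_neg (h i le_rfl (by omega)), ih (i + 1) (by omega)
          (fun j h1 h2 => h j (by omega) h2)]

theorem colFree_stop {g : List (List String)} {w m : Nat}
    (hmw : m < w) (hm : "X" ∈ pvCol g m) :
    ∀ i, i ≤ m → (∀ j, i ≤ j → j < m → "X" ∉ pvCol g j) → pvColFree g w i = m - i := by
  intro i
  induction hd : m - i generalizing i with
  | zero =>
      intro him _
      have : i = m := by omega
      subst this
      rw [pvColFree, dif_pos hmw, if_pos hm]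
  | succ d ih =>
      intro him h
      rw [pvColFree, dif_pos (by omega : i < w),
        if_neg (h i le_rfl (by omega)), ih (i + 1) (by omega) (by omega)
          (fun j h1 h2 => h j (by omega) h2)]

theorem headD_map_range {f : Nat → List String} {n : Nat} (h : 0 < n) :
    ((List.range n).map f).headD [] = f 0 := by
  obtain ⟨m, rfl⟩ := Nat.exists_eq_add_of_lt h
  rw [Nat.zero_add, List.range_succ_eq_map]
  simp

theorem getD_map_range {f : Nat → List String} {n j : Nat} (h : j < n) :
    ((List.range n).map f).getD j [] = f j := by
  rw [List.getD_eq_getElem _ _ (by simpa using h)]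
  simp

theorem getD_replicate_lt {w i : Nat} {d : String} (h : i < w) :
    (List.replicate w ".").getD i d = "." := by
  rw [List.getD_eq_getElem _ _ (by simpa using h)]
  simp

theorem getD_X_lt {row : List String} {i : Nat} (h : row.getD i "?" = "X") :
    i < row.length := by
  by_contra hh
  rw [List.getD_eq_default _ _ (by omega)] at h
  exact absurd h (by decide)

-- ===== VERDICT (by name: the statement is the Claim_ definition above) =====
theorem stick_to_corner_py_spec : Claim_equal_stick_to_corner_py := by
  intro shape _hdom hpre
  obtain ⟨hne, hpre2⟩ := hpre
  have hn : 0 < shape.length := List.length_pos_iff.mpr hne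
  unfold Spec_stick_to_corner_py stick_to_corner_py stick_to_corner_py_alt
  by_cases hX : ∀ row ∈ shape, "X" ∉ row
  · -- no "X" anywhere: both sides are the all-"." grid
    have hxs : pvXs shape = [] := by
      rw [List.eq_nil_iff_forall_not_mem]
      rintro ⟨r, c⟩ hm
      rw [mem_pvXs] at hm
      obtain ⟨hr, hc, hv⟩ := hm
      exact hX _ (getD_mem_shape hr) (getD_mem_iff.mpr ⟨c, hc, hv⟩)
    have hmr : pvRowFree shape = shape.length := rowFree_all hX
    have hwT : ((pvTop shape).headD []).length = (shape.headD []).length := by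
      rw [pvTop, headD_map_range hn, if_neg (by omega)]
      simp
    have hflc : pvColFree (pvTop shape) (shape.headD []).length 0
        = (shape.headD []).length := by
      rw [colFree_all 0 ?_]
      · omega
      · intro j _ hjw hmem
        simp only [pvCol] at hmem
        obtain ⟨row, hrow, hval⟩ := List.mem_map.mp hmem
        rw [pvTop] at hrow
        obtain ⟨k, hk, rfl⟩ := List.mem_map.mp hrow
        rw [if_neg (by omega), getD_replicate_lt hjw] at hval
        exact absurd hval (by decide)
    simp only [hwT]
    simp only [hflc]
    simp only [hxs, List.map_nil, List.min?_nil, Option.getD_none]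
    refine List.map_congr_left fun j hj => List.map_congr_left fun i hi => ?_
    rw [if_neg (by omega), if_neg (by omega)]
  · push_neg at hX
    obtain ⟨row0, hrow0mem, hrow0X⟩ := hX
    have hpre3 := hpre2.resolve_left (by intro h; exact absurd hrow0X (h row0 hrow0mem))
    obtain ⟨k0, hk0, hk0v⟩ := List.mem_iff_getElem.mp hrow0mem
    have hXk0 : "X" ∈ shape.getD k0 [] := by
      rw [List.getD_eq_getElem _ _ hk0, hk0v]; exact hrow0X
    have hmrlt : pvRowFree shape < shape.length :=
      lt_of_le_of_lt (rowFree_le_of_mem hXk0) hk0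
    have hXmr : "X" ∈ shape.getD (pvRowFree shape) [] := rowFree_mem hmrlt
    obtain ⟨c0, hc0, hc0v⟩ := getD_mem_iff.mp hXmr
    have hmemxs : (pvRowFree shape, c0) ∈ pvXs shape := mem_pvXs.mpr ⟨hmrlt, hc0, hc0v⟩
    have hminr : ((pvXs shape).map Prod.fst).min? = some (pvRowFree shape) := by
      rw [List.min?_eq_some_iff']
      refine ⟨List.mem_map.mpr ⟨_, hmemxs, rfl⟩, ?_⟩
      intro b hb
      obtain ⟨⟨r, c⟩, hrc, rfl⟩ := List.mem_map.mp hb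
      obtain ⟨hr, hc, hv⟩ := mem_pvXs.mp hrc
      exact rowFree_le_of_mem (getD_mem_iff.mpr ⟨c, hc, hv⟩)
    obtain ⟨mc, hmc⟩ : ∃ mc, ((pvXs shape).map Prod.snd).min? = some mc := by
      cases h : ((pvXs shape).map Prod.snd).min? with
      | none =>
          rw [List.min?_eq_none_iff, List.map_eq_nil_iff] at h
          rw [h] at hmemxs
          exact absurd hmemxs (by simp)
      | some mc => exact ⟨mc, rfl⟩
    have hmc_mem : mc ∈ (pvXs shape).map Prod.snd := (List.min?_eq_some_iff'.mp hmc).1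
    have hmc_le : ∀ b ∈ (pvXs shape).map Prod.snd, mc ≤ b := (List.min?_eq_some_iff'.mp hmc).2
    have hcol : ∀ i, "X" ∈ pvCol (pvTop shape) i ↔ i ∈ (pvXs shape).map Prod.snd := by
      intro i
      constructor
      · intro h
        simp only [pvCol] at h
        obtain ⟨row, hrow, hval⟩ := List.mem_map.mp h
        rw [pvTop] at hrow
        obtain ⟨k, hk, rfl⟩ := List.mem_map.mp hrow
        rw [List.mem_range] at hk
        by_cases hks : k < shape.length - pvRowFree shape
        · rw [if_pos hks] at hval
          have hilen : i < (shape.getD (k + pvRowFree shape) []).length := getD_X_lt hval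
          exact List.mem_map.mpr ⟨(k + pvRowFree shape, i),
            mem_pvXs.mpr ⟨by omega, hilen, hval⟩, rfl⟩
        · rw [if_neg hks] at hval
          by_cases hiw : i < (shape.headD []).length
          · rw [getD_replicate_lt hiw] at hval
            exact absurd hval (by decide)
          · rw [List.getD_eq_default _ _ (by simpa using hiw)] at hval
            exact absurd hval (by decide)
      · intro h
        obtain ⟨⟨r, c⟩, hrc, rfl⟩ := List.mem_map.mp h
        obtain ⟨hr, hclen, hv⟩ := mem_pvXs.mp hrc
        have hmrr : pvRowFree shape ≤ r := rowFree_le_of_mem (getD_mem_iff.mpr ⟨_, hclen, hv⟩)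
        simp only [pvCol]
        refine List.mem_map.mpr ⟨shape.getD r [], ?_, hv⟩
        rw [pvTop]
        refine List.mem_map.mpr ⟨r - pvRowFree shape, List.mem_range.mpr (by omega), ?_⟩
        rw [if_pos (by omega)]
        congr 1
        omega
    have hwT : ((pvTop shape).headD []).length = (shape.headD []).length := by
      rw [pvTop, headD_map_range hn, if_pos (by omega), Nat.zero_add]
      exact hpre3.1 _ (List.mem_range.mpr hmrlt)
        ⟨hXmr, fun j hj => rowFree_not_mem (List.mem_range.mp hj)⟩
    have htopj : ∀ j, j < shape.length → (pvTop shape).getD j [] =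
        (if j < shape.length - pvRowFree shape then shape.getD (j + pvRowFree shape) []
         else List.replicate (shape.headD []).length ".") := by
      intro j hj
      rw [pvTop, getD_map_range hj]
    by_cases hmcw : mc < (shape.headD []).length
    · have hflc : pvColFree (pvTop shape) (shape.headD []).length 0 = mc := by
        rw [colFree_stop hmcw ((hcol mc).mpr hmc_mem) 0 (Nat.zero_le _) ?_]
        · omega
        · intro j _ hj hmem
          exact absurd (hmc_le _ ((hcol j).mp hmem)) (by omega)
      simp only [hwT]
      simp only [hflc]
      simp only [hminr, hmc, Option.getD_some]
      refine List.map_congr_left fun j hj => List.map_congr_left fun i hi => ?_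
      rw [List.mem_range] at hj hi
      split_ifs with h1 h2
      · rw [htopj j hj, if_pos (by omega)]
      · rw [htopj j hj, if_neg (by omega), getD_replicate_lt (by omega)]
      · exact absurd h1 (by omega)
      · rfl
    · have hflc : pvColFree (pvTop shape) (shape.headD []).length 0
          = (shape.headD []).length := by
        rw [colFree_all 0 ?_]
        · omega
        · intro j _ hj hmem
          exact absurd (hmc_le _ ((hcol j).mp hmem)) (by omega)
      simp only [hwT]
      simp only [hflc]
      simp only [hminr, hmc, Option.getD_some]
      refine List.map_congr_left fun j hj => List.map_congr_left fun i hi => ?_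
      rw [List.mem_range] at hi
      rw [if_neg (by omega), if_neg (by omega)]
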